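-- pv_equiv track=rewrite | github.com/Yoo-Ju/MSRA_proposal_wifi_log | code/code/sequencefeaturegenerator.py | leavelongest_samesupport
-- ===== SOURCE A (Python) =====
-- def is_subseq(x, y):
--     it = iter(y)
--     return all(c in it for c in x)
--
-- def recursivelyFindLongestSequence(aabaaba, new_list):
--
--     try:
--         for item in aabaaba:
--             testval = 0
--             for longt in new_list:
--                 testval += is_subseq(item, longt)
--
--             if testval == 0:
--                 new_list.append(item)
--
--         for item in new_list:
--             aabaaba.remove(item)
--
--
--         recursivelyFindLongestSequence(aabaaba, new_list)
--     except:
--         pass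
--
-- def leavelongest_samesupport(freq_seqs_sample):
--
-- 	freq_seqs_sample2 = {}
-- 	for kv in freq_seqs_sample:
-- 	    freq_seqs_sample2.setdefault(kv[1], []).append(kv[0])
--
-- 	freqfreqfreq = []
--
-- 	for k, v in freq_seqs_sample2.items():
-- 	    if len(v) > 1:
-- 	        v = sorted(v, key = len, reverse=True)
-- 	        new_list = []
-- 	        new_list.append(v[0])
-- 	        recursivelyFindLongestSequence(v, new_list)
-- 	        for item in new_list:
-- 	            freqfreqfreq.append(tuple((item, k)))
-- 	    else:
-- 	        freqfreqfreq.append(tuple((v[0], k)))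
--
-- 	freqfreqfreq = sorted(freqfreqfreq, key=lambda tup: tup[1], reverse=True)
-- 	return freqfreqfreq
-- ===== SOURCE B (Python) =====
-- def is_subseq(x, y):
--     it = iter(y)
--     return all(c in it for c in x)
--
-- def leavelongest_samesupport(freq_seqs_sample):
--     groups = {}
--     for kv in freq_seqs_sample:
--         groups.setdefault(kv[1], []).append(kv[0])
--
--     result = []
--     for k, v in groups.items():
--         kept = []
--         for item in sorted(v, key=len, reverse=True):
--             if not any(is_subseq(item, longer) for longer in kept):
--                 kept.append(item)
--         result += [(item, k) for item in kept]
--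
--     return sorted(result, key=lambda tup: tup[1], reverse=True)
-- ===== Notes on version B (the rewrite author's own statement) =====
-- stated objective: simpler
-- what changed: The recursive, list-mutating, exception-terminated pruning routine (repeated passes with a subsequence-count and remove() calls until a swallowed exception stops it) is replaced by a single greedy pass per group that keeps an item unless it is a subsequence of an already-kept one; grouping and the stable descending sorts are unchanged.
import Mathlib
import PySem

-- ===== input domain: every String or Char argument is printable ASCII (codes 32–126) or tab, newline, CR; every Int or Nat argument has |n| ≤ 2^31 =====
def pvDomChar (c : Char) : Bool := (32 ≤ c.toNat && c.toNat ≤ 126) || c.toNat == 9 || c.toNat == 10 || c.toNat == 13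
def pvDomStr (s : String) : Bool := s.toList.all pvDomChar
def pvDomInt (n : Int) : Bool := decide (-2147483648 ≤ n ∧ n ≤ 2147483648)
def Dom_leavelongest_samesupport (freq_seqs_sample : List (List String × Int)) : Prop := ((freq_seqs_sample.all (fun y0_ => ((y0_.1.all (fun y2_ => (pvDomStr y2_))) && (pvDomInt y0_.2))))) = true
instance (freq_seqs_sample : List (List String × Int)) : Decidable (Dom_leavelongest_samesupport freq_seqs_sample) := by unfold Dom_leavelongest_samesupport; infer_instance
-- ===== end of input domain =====

-- B replaces A's recursive, list-mutating, exception-terminated pruning routine by a single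
-- greedy pass per group (objective: simpler); return values agree on every input.


-- ===== PORT A =====

-- `c in it` on an iterator: consume elements until `c` is found (rest of the iterator), none = not found
def pvConsume (c : String) : List String → Option (List String)
  | [] => none
  | h :: t => if h = c then some t else pvConsume c t

-- is_subseq(x, y) (shared helper of Source A and Source B, ported once)
def pvIsSubseq : List String → List String → Bool
  | [], _ => true
  | c :: cs, y =>
    match pvConsume c y with
    | none => false
    | some y' => pvIsSubseq cs y'

-- testval = 0; for longt in new_list: testval += is_subseq(item, longt)
def pvCount (item : List String) (nl : List (List String)) : Int :=
  nl.foldl (fun t l => t + (if pvIsSubseq item l then 1 else 0)) 0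

-- the first for-loop of recursivelyFindLongestSequence (appends to new_list)
def pvPass (aab nl : List (List String)) : List (List String) :=
  aab.foldl (fun acc item => if pvCount item acc = 0 then acc ++ [item] else acc) nl

-- for item in new_list: aabaaba.remove(item)   (none = the ValueError the bare `except` catches)
def pvRemoveAll : List (List String) → List (List String) → Option (List (List String))
  | [], aab => some aab
  | x :: xs, aab =>
    match PySem.List.remove? aab x with
    | none => none
    | some aab' => pvRemoveAll xs aab'

-- recursivelyFindLongestSequence, returning the final value of new_list.
-- The body sits in `try: … except: pass`: a failing remove ends the recursion with new_list as is.
-- The fuel and length guards are totality guards only: when all removals succeed and new_list is nonempty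
-- the list strictly shrinks; the non-shrinking case is new_list = [], where CPython recurses until
-- RecursionError, which the same bare `except` catches, returning new_list unchanged — as here.
def pvRFLSAux : Nat → List (List String) → List (List String) → List (List String)
  | 0, _, nl => nl
  | fuel + 1, aab, nl =>
    let nl' := pvPass aab nl
    match pvRemoveAll nl' aab with
    | none => nl'
    | some aab' =>
      if aab'.length < aab.length then pvRFLSAux fuel aab' nl' else nl'

def pvRFLS (aab nl : List (List String)) : List (List String) :=
  pvRFLSAux (aab.length + 1) aab nl

def leavelongest_samesupport (freq_seqs_sample : List (List String × Int)) : List (List String × Int) :=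
  let d : PySem.Dict Int (List (List String)) :=
    freq_seqs_sample.foldl (fun d kv => d.modify kv.2 [] (fun old => old ++ [kv.1])) PySem.Dict.empty
  let fff := d.items.foldl (fun acc kv =>
    if 1 < PySem.List.len kv.2 then
      let v := PySem.List.sorted kv.2 (fun l => PySem.List.len l) true
      let nl := pvRFLS v [PySem.List.pyGetD v 0 []]
      nl.foldl (fun acc2 item => acc2 ++ [(item, kv.1)]) acc
    else
      acc ++ [(PySem.List.pyGetD kv.2 0 [], kv.1)]) []
  PySem.List.sorted fff (fun t => t.2) true

-- ===== PORT B =====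
def leavelongest_samesupport_alt (freq_seqs_sample : List (List String × Int)) : List (List String × Int) :=
  let groups : PySem.Dict Int (List (List String)) :=
    freq_seqs_sample.foldl (fun d kv => d.modify kv.2 [] (fun old => old ++ [kv.1])) PySem.Dict.empty
  let result := groups.items.foldl (fun acc kv =>
    let kept := (PySem.List.sorted kv.2 (fun l => PySem.List.len l) true).foldl
      (fun kept item => if kept.any (fun longer => pvIsSubseq item longer) then kept else kept ++ [item]) []
    acc ++ kept.map (fun item => (item, kv.1))) []
  PySem.List.sorted result (fun t => t.2) true

-- ===== PRECONDITION & SPEC =====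
def Spec_leavelongest_samesupport (freq_seqs_sample : List (List String × Int)) (out : List (List String × Int)) : Prop := out = leavelongest_samesupport_alt freq_seqs_sample
instance (freq_seqs_sample : List (List String × Int)) (out : List (List String × Int)) : Decidable (Spec_leavelongest_samesupport freq_seqs_sample out) := by unfold Spec_leavelongest_samesupport; infer_instance

-- ===== CLAIM (what is proved, stated in full; the proofs are below) =====
def Claim_equal_leavelongest_samesupport : Prop := ∀ (freq_seqs_sample : List (List String × Int)), Dom_leavelongest_samesupport freq_seqs_sample → Spec_leavelongest_samesupport freq_seqs_sample (leavelongest_samesupport freq_seqs_sample)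

-- ===== LEMMAS AND PROOFS =====

theorem pvIsSubseq_refl (x : List String) : pvIsSubseq x x = true := by
  induction x with
  | nil => rfl
  | cons c cs ih => simp [pvIsSubseq, pvConsume, ih]

theorem pvCount_zero_iff (item : List String) (nl : List (List String)) :
    pvCount item nl = 0 ↔ nl.any (fun l => pvIsSubseq item l) = false := by
  unfold pvCount
  rw [PySem.List.foldl_congr_mem nl _ (fun t l => if pvIsSubseq item l then t + 1 else t) 0
    (by intro acc x _; by_cases hx : pvIsSubseq item x <;> simp [hx])]
  rw [PySem.List.foldl_if_add_one]
  simp [List.countP_eq_zero, List.any_eq_false]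

theorem pvPass_prefix (aab : List (List String)) : ∀ nl, nl <+: pvPass aab nl := by
  induction aab with
  | nil => intro nl; exact List.prefix_refl nl
  | cons a t ih =>
    intro nl
    show nl <+: List.foldl _ (if pvCount a nl = 0 then nl ++ [a] else nl) t
    refine List.IsPrefix.trans ?_ (ih _)
    split
    · exact List.prefix_append nl [a]
    · exact List.prefix_refl nl

theorem pvPass_witness (aab : List (List String)) :
    ∀ nl, ∀ item ∈ aab, ∃ l ∈ pvPass aab nl, pvIsSubseq item l = true := by
  induction aab with
  | nil => intro nl item h; cases h
  | cons a t ih =>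
    intro nl item hmem
    have hstep : pvPass (a :: t) nl = pvPass t (if pvCount a nl = 0 then nl ++ [a] else nl) := rfl
    rcases List.mem_cons.mp hmem with rfl | hmem'
    · by_cases hc : pvCount item nl = 0
      · refine ⟨item, ?_, pvIsSubseq_refl item⟩
        rw [hstep, if_pos hc]
        exact (pvPass_prefix t (nl ++ [item])).subset (by simp)
      · have hany : nl.any (fun l => pvIsSubseq item l) = true := by
          cases hb : nl.any (fun l => pvIsSubseq item l) with
          | false => exact absurd ((pvCount_zero_iff item nl).mpr hb) hc
          | true => rfl
        rcases List.any_eq_true.mp hany with ⟨l, hl, hsub⟩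
        refine ⟨l, ?_, by simpa using hsub⟩
        rw [hstep]
        refine (pvPass_prefix t _).subset ?_
        split <;> simp [hl]
    · rw [hstep]; exact ih _ item hmem'

theorem pvPass_fixed (aab : List (List String)) : ∀ nl,
    (∀ item ∈ aab, ∃ l ∈ nl, pvIsSubseq item l = true) → pvPass aab nl = nl := by
  induction aab with
  | nil => intro nl _; rfl
  | cons a t ih =>
    intro nl h
    rcases h a (by simp) with ⟨l, hl, hsub⟩
    have hany : nl.any (fun l => pvIsSubseq a l) = true := List.any_eq_true.mpr ⟨l, hl, by simpa using hsub⟩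
    have hc : ¬ pvCount a nl = 0 := by
      intro h0
      rw [(pvCount_zero_iff a nl).mp h0] at hany
      cases hany
    have hstep : pvPass (a :: t) nl = pvPass t (if pvCount a nl = 0 then nl ++ [a] else nl) := rfl
    rw [hstep, if_neg hc]
    exact ih nl (fun item hm => h item (by simp [hm]))

theorem pvRemoveAll_subset (xs : List (List String)) :
    ∀ aab aab', pvRemoveAll xs aab = some aab' → ∀ y ∈ aab', y ∈ aab := by
  induction xs with
  | nil => intro aab aab' h y hy; cases h; exact hy
  | cons x xs ih =>
    intro aab aab' h y hy
    unfold pvRemoveAll at h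
    cases heq : PySem.List.remove? aab x with
    | none => rw [heq] at h; cases h
    | some t =>
      rw [heq] at h
      have hx : x ∈ aab := by
        by_contra hx
        rw [(PySem.List.remove?_eq_none_iff aab x).mpr hx] at heq
        cases heq
      have ht : t = aab.erase x := by
        have := PySem.List.remove?_eq_some_erase aab x hx
        rw [heq] at this; exact (Option.some_inj.mp this)
      have := ih t aab' h y hy
      rw [ht] at this
      exact List.mem_of_mem_erase this

theorem pvRFLSAux_fixed (fuel : Nat) : ∀ aab nl,
    (∀ item ∈ aab, ∃ l ∈ nl, pvIsSubseq item l = true) → pvRFLSAux fuel aab nl = nl := by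
  induction fuel with
  | zero => intro aab nl _; rfl
  | succ fuel ih =>
    intro aab nl h
    show (let nl' := pvPass aab nl;
      match pvRemoveAll nl' aab with
      | none => nl'
      | some aab' => if aab'.length < aab.length then pvRFLSAux fuel aab' nl' else nl') = nl
    simp only [pvPass_fixed aab nl h]
    split
    · rfl
    · rename_i aab' heq
      split
      · exact ih aab' nl (fun item hm => h item (pvRemoveAll_subset nl aab aab' heq item hm))
      · rfl

theorem pvRFLS_eq_pass (aab nl : List (List String)) : pvRFLS aab nl = pvPass aab nl := by
  show (let nl' := pvPass aab nl;
    match pvRemoveAll nl' aab with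
    | none => nl'
    | some aab' => if aab'.length < aab.length then pvRFLSAux aab.length aab' nl' else nl') = pvPass aab nl
  simp only []
  split
  · rfl
  · rename_i aab' heq
    split
    · exact pvRFLSAux_fixed aab.length aab' (pvPass aab nl)
        (fun item hm => pvPass_witness aab nl item (pvRemoveAll_subset _ aab aab' heq item hm))
    · rfl

-- A's branch on a group (k, v) equals B's uniform greedy pass, for the nonempty v a group always has
theorem pvGroup_step (k : Int) (v : List (List String)) (hv : v ≠ []) (acc : List (List String × Int)) :
    (if 1 < PySem.List.len v then
      (pvRFLS (PySem.List.sorted v (fun l => PySem.List.len l) true)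
        [PySem.List.pyGetD (PySem.List.sorted v (fun l => PySem.List.len l) true) 0 []]).foldl
        (fun acc2 item => acc2 ++ [(item, k)]) acc
    else acc ++ [(PySem.List.pyGetD v 0 [], k)])
  = acc ++ ((PySem.List.sorted v (fun l => PySem.List.len l) true).foldl
      (fun kept item => if kept.any (fun longer => pvIsSubseq item longer) then kept else kept ++ [item]) []).map
      (fun item => (item, k)) := by
  rcases v with _ | ⟨x, rest⟩
  · exact absurd rfl hv
  rcases rest with _ | ⟨y, rest'⟩
  · -- singleton group: A skips sorting; sorted of a singleton is itself
    rw [if_neg (by simp [PySem.List.len_eq])]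
    rw [PySem.List.sorted_rev_eq_self_of_pairwise [x] _ (List.pairwise_singleton _ x)]
    simp [PySem.List.pyGetD_zero_cons]
  · -- group of size ≥ 2
    rw [if_pos (by simp only [PySem.List.len_eq, List.length_cons]; omega)]
    have hlen : (PySem.List.sorted (x :: y :: rest') (fun l => PySem.List.len l) true).length
        = rest'.length + 2 := by rw [PySem.List.length_sorted]; simp
    rcases hsv : PySem.List.sorted (x :: y :: rest') (fun l => PySem.List.len l) true with _ | ⟨h, t⟩
    · rw [hsv] at hlen; simp at hlen
    rw [pvRFLS_eq_pass, PySem.List.pyGetD_zero_cons]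
    have hcount : pvCount h [h] = 1 := by simp [pvCount, pvIsSubseq_refl]
    have hA : pvPass (h :: t) [h] = pvPass t [h] := by
      show pvPass t (if pvCount h [h] = 0 then [h] ++ [h] else [h]) = pvPass t [h]
      rw [hcount]; simp
    have hB : (h :: t).foldl
        (fun kept item => if kept.any (fun longer => pvIsSubseq item longer) then kept else kept ++ [item]) []
        = t.foldl (fun kept item => if kept.any (fun longer => pvIsSubseq item longer) then kept else kept ++ [item]) [h] := by
      simp
    rw [hA, hB]
    have hfold : pvPass t [h] = t.foldl
        (fun kept item => if kept.any (fun longer => pvIsSubseq item longer) then kept else kept ++ [item]) [h] := by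
      unfold pvPass
      refine List.foldl_ext _ _ [h] ?_
      intro a b _
      by_cases hany : a.any (fun longer => pvIsSubseq b longer) = true
      · have hc : ¬ pvCount b a = 0 := by
          intro h0; rw [(pvCount_zero_iff b a).mp h0] at hany; cases hany
        simp [hc, hany]
      · have hc : pvCount b a = 0 := (pvCount_zero_iff b a).mpr (by simpa using hany)
        simp [hc, hany]
    rw [hfold, PySem.List.foldl_append_singleton_eq_map]

-- every value of the grouping dict is nonempty (each key is created by appending its first sequence)
theorem pvDict_values_ne_nil (s : List (List String × Int)) :
    ∀ kv ∈ (s.foldl (fun d kv => d.modify kv.2 [] (fun old => old ++ [kv.1]))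
      (PySem.Dict.empty : PySem.Dict Int (List (List String)))).items, kv.2 ≠ [] := by
  intro kv hm
  obtain ⟨k1, v1⟩ := kv
  simp only [] at hm ⊢
  have hfold : (s.foldl (fun d kv => d.modify kv.2 [] (fun old => old ++ [kv.1]))
      (PySem.Dict.empty : PySem.Dict Int (List (List String))))
      = (s.map (fun kv => (kv.2, kv.1))).foldl (fun d p => d.modify p.1 [] (fun old => old ++ [p.2]))
        PySem.Dict.empty := by
    rw [List.foldl_map]
  have hnodup := PySem.Dict.nodup_keys_foldl_modify_key s (fun kv => kv.2) []
    (fun _ kv => (fun old => old ++ [kv.1])) (PySem.Dict.empty : PySem.Dict Int (List (List String)))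
    (by simp [PySem.Dict.empty])
  have hget := PySem.Dict.get?_of_mem_items _ (by exact hm) hnodup
  have hgetD : (s.foldl (fun d kv => d.modify kv.2 [] (fun old => old ++ [kv.1]))
      (PySem.Dict.empty : PySem.Dict Int (List (List String)))).getD k1 [] = v1 := by
    rw [PySem.Dict.getD_eq_get?_getD, hget]; rfl
  have hkey : k1 ∈ s.map (fun kv => kv.2) := by
    have h1 := PySem.Dict.mem_keys_of_mem_items _ hm
    rw [PySem.Dict.keys_foldl_modify_key s (fun kv => kv.2) []
      (fun _ kv => (fun old => old ++ [kv.1]))] at h1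
    have h2 : (PySem.Dict.empty : PySem.Dict Int (List (List String))).keys = [] := by
      simp [PySem.Dict.empty]
    rw [h2, PySem.Set.update_nil_left] at h1
    exact (PySem.Set.mem_ofList _ _).mp h1
  rcases List.mem_map.mp hkey with ⟨a, ha, hak⟩
  have hchar : (s.foldl (fun d kv => d.modify kv.2 [] (fun old => old ++ [kv.1]))
      (PySem.Dict.empty : PySem.Dict Int (List (List String)))).getD k1 []
      = ((s.map (fun kv => (kv.2, kv.1))).filter (fun p => p.1 == k1)).map (fun x => x.2) := by
    rw [hfold, PySem.Dict.getD_foldl_modify_append]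
    have he : (PySem.Dict.empty : PySem.Dict Int (List (List String))).getD k1 [] = [] := rfl
    rw [he, List.nil_append]
  intro hnil
  rw [hgetD, hnil] at hchar
  have : (a.2, a.1) ∈ (s.map (fun kv => (kv.2, kv.1))).filter (fun p => p.1 == k1) := by
    refine List.mem_filter.mpr ⟨List.mem_map.mpr ⟨a, ha, rfl⟩, by simp [hak]⟩
  have hmm : a.1 ∈ ((s.map (fun kv => (kv.2, kv.1))).filter (fun p => p.1 == k1)).map (fun x => x.2) :=
    List.mem_map.mpr ⟨(a.2, a.1), this, rfl⟩
  rw [← hchar] at hmm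
  cases hmm

-- ===== VERDICT (by name: the statement is the Claim_ definition above) =====
theorem leavelongest_samesupport_spec : Claim_equal_leavelongest_samesupport := by
  intro s _
  unfold Spec_leavelongest_samesupport leavelongest_samesupport leavelongest_samesupport_alt
  simp only []
  congr 1
  refine PySem.List.foldl_congr_mem _ _ _ [] ?_
  intro acc kv hkv
  exact pvGroup_step kv.1 kv.2 (pvDict_values_ne_nil s kv hkv) acc
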